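-- pv_equiv track=rewrite | github.com/kyungjinleelee/Algorithm | 프로그래머스/0/181855. 문자열 묶기/문자열 묶기.py | solution
-- ===== SOURCE A (Python) =====
-- def solution(strArr):
--     group_counts = {}
--
--     for s in strArr:
--         length = len(s)
--         # length가 딕셔너리의 키로 존재하지 않는다면, 새로운 키로 추가하고 값을 1로 설정
--         if length not in group_counts:
--             group_counts[length] = 1
--         # 존재하면 해당 키의 값에 1 추가
--         else:
--             group_counts[length] += 1
--
--     return max(group_counts.values())
-- ===== SOURCE B (Python) =====
-- def solution(strArr):
--     lengths = sorted(len(s) for s in strArr)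
--     best = 0
--     run = 0
--     prev = None
--     for x in lengths:
--         run = run + 1 if prev == x else 1
--         prev = x
--         best = max(best, run)
--     return best
-- ===== Notes on version B (the rewrite author's own statement) =====
-- stated objective: alternative
-- what changed: Replaces the single-pass dict-of-counts aggregation by sort-then-scan: sort the lengths and return the longest run of equal adjacent values, which equals the maximum frequency.
import Mathlib
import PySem

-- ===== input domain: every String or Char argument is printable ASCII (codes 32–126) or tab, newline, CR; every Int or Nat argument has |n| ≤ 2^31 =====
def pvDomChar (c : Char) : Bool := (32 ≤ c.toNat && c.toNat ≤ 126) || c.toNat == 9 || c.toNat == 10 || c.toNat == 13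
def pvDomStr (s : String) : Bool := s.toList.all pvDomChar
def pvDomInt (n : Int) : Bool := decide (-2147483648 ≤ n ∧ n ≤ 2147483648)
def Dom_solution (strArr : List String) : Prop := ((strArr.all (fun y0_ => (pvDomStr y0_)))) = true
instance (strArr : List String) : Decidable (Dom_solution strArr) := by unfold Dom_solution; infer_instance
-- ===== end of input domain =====

-- B replaces A's running count-dict by sorting the lengths and scanning for the longest run of equal adjacent values (a different algorithm of similar cost).


-- ===== PORT A =====
-- for s in strArr: if len(s) not in gc: gc[len(s)] = 1 else: gc[len(s)] += 1; return max(gc.values())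
def solution (strArr : List String) : Int :=
  let gc : PySem.Dict Int Int :=
    strArr.foldl (fun d s =>
      let length : Int := PySem.Str.len s
      if ¬ d.contains length then d.insert length 1
      else d.insert length (d.getD length 0 + 1)) PySem.Dict.empty
  (PySem.List.max? gc.values (fun v => v)).getD 0   -- none (empty dict) = ValueError, excluded by Pre_

-- ===== PORT B =====
-- loop body of Source B: run = run + 1 if prev == x else 1; prev = x; best = max(best, run)   (state = (best, run, prev))
def bStep (st : Int × Int × Option Int) (x : Int) : Int × Int × Option Int :=
  let run := if st.2.2 = some x then st.2.1 + 1 else 1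
  (max st.1 run, run, some x)

def solution_alt (strArr : List String) : Int :=
  let lengths : List Int := PySem.List.sorted (strArr.map (fun s => (PySem.Str.len s : Int))) (fun x => x) false
  (lengths.foldl bStep (0, 0, none)).1

-- ===== PRECONDITION & SPEC =====
-- Pre_ excludes the empty list, on which Python's max() in A raises ValueError.
def Pre_solution (strArr : List String) : Prop := strArr ≠ []
instance (strArr : List String) : Decidable (Pre_solution strArr) := by unfold Pre_solution; infer_instance
def pvWitness_solution : List String := (["a", "bb", "a"])

def Spec_solution (strArr : List String) (out : Int) : Prop := out = solution_alt strArr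
instance (strArr : List String) (out : Int) : Decidable (Spec_solution strArr out) := by unfold Spec_solution; infer_instance

-- ===== CLAIM =====
def Claim_equal_solution : Prop := ∀ (strArr : List String), Dom_solution strArr → Pre_solution strArr → Spec_solution strArr (solution strArr)

-- ===== LEMMAS AND PROOFS =====

-- the common specification value: the maximum multiplicity of an element of l (0 for the empty list)
def Mcnt (l : List Int) : Nat := l.toFinset.sup (fun y => l.count y)

-- appending one element raises the max multiplicity to at least count+1 of that element
theorem Mcnt_append_singleton (q : List Int) (x : Int) :
    Mcnt (q ++ [x]) = max (q.count x + 1) (Mcnt q) := by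
  unfold Mcnt
  have hT : (q ++ [x]).toFinset = insert x q.toFinset := by
    simp [List.toFinset_append]
  have hc : ∀ y : Int, (q ++ [x]).count y = q.count y + (if y = x then 1 else 0) := by
    intro y; simp [List.count_append, List.count_singleton]
    split_ifs with h1 h2 h3 <;> omega
  have hx : (q ++ [x]).count x = q.count x + 1 := by simp [hc]
  rw [hT, Finset.sup_insert, hx]
  apply le_antisymm
  · apply max_le
    · exact le_max_left _ _
    · apply Finset.sup_le
      intro y hy
      rw [hc]
      by_cases hyx : y = x
      · subst hyx; simp
      · simp only [hyx, if_false, add_zero]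
        exact le_max_of_le_right (Finset.le_sup (f := fun y => q.count y) hy)
  · apply max_le
    · exact le_max_left _ _
    · refine le_trans (Finset.sup_mono_fun ?_) (le_max_right _ _)
      intro y _; rw [hc]; omega

-- a running max over Int casts of Nat values is the Finset sup
theorem foldl_max_cast (ks : List Int) (f : Int → Nat) (a : Nat) :
    ks.foldl (fun (b : Int) k => max b ((f k : Nat) : Int)) ((a : Nat) : Int)
      = ((max a (ks.toFinset.sup f) : Nat) : Int) := by
  induction ks generalizing a with
  | nil => simp
  | cons k ks ih =>
    simp only [List.foldl_cons]
    rw [show (max (a : Int) ((f k : Nat) : Int)) = ((max a (f k) : Nat) : Int) by simp [Nat.cast_max]]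
    rw [ih]
    congr 1
    rw [List.toFinset_cons, Finset.sup_insert]
    omega

-- A's loop is the canonical Counter loop on the length list.
theorem solution_dict_eq (strArr : List String) :
    strArr.foldl (fun (d : PySem.Dict Int Int) s =>
      let length : Int := PySem.Str.len s
      if ¬ d.contains length then d.insert length 1
      else d.insert length (d.getD length 0 + 1)) PySem.Dict.empty
    = PySem.Dict.counter (strArr.map (fun s => (PySem.Str.len s : Int))) := by
  rw [← List.foldl_map (f := fun s => (PySem.Str.len s : Int))
        (g := fun (d : PySem.Dict Int Int) length =>
          if ¬ d.contains length then d.insert length 1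
          else d.insert length (d.getD length 0 + 1))]
  rw [← PySem.Dict.foldl_insert_getD_add_one_eq_counter]
  apply PySem.List.foldl_congr_mem
  intro d x _
  by_cases h : d.contains x = true
  · simp [h]
  · have hg : d.getD x 0 = 0 := by
      rw [PySem.Dict.getD_of_not_contains]
      simpa using h
    simp [h, hg]

-- A's result, max over the counter's values, is the max multiplicity of the length list.
theorem solA (L : List Int) (h : L ≠ []) :
    (PySem.List.max? ((PySem.Set.ofList L).map (fun k => (L.count k : Int))) (fun v => v)).getD 0
      = (Mcnt L : Int) := by
  have hTF : (PySem.Set.ofList L).toFinset = L.toFinset := by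
    ext y; simp [List.mem_toFinset, PySem.Set.mem_ofList]
  have hd : PySem.Set.ofList L ≠ [] := by
    obtain ⟨a, t, rfl⟩ := List.exists_cons_of_ne_nil h
    intro he
    have : a ∈ PySem.Set.ofList (a :: t) := by rw [PySem.Set.mem_ofList]; simp
    simp [he] at this
  obtain ⟨k0, ks, hks⟩ := List.exists_cons_of_ne_nil hd
  rw [hks] at hTF ⊢
  simp only [List.map_cons]
  rw [PySem.List.max?_id_cons, Option.getD_some, List.foldl_map]
  rw [foldl_max_cast ks (fun k => L.count k) (L.count k0)]
  unfold Mcnt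
  rw [← hTF, List.toFinset_cons, Finset.sup_insert]

-- B's run-scan invariant: after a nonempty processed prefix q whose maximum element is p (= prev),
-- the state is (max multiplicity of q, count of p in q, some p).
theorem runInv (l : List Int) : ∀ (q : List Int) (p : Int),
    (q ++ l).Pairwise (· ≤ ·) → p ∈ q → (∀ y ∈ q, y ≤ p) →
    (l.foldl bStep ((Mcnt q : Int), (q.count p : Int), some p)).1 = (Mcnt (q ++ l) : Int) := by
  induction l with
  | nil => intro q p _ _ _; simp
  | cons x l ih =>
    intro q p hpw hp hle
    have hqx : ∀ y ∈ q, y ≤ x := fun y hy => (List.pairwise_append.mp hpw).2.2 y hy x (by simp)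
    have hpw' : ((q ++ [x]) ++ l).Pairwise (· ≤ ·) := by
      rw [List.append_assoc]; simpa using hpw
    have hmem' : x ∈ q ++ [x] := by simp
    have hle' : ∀ y ∈ q ++ [x], y ≤ x := by
      intro y hy
      rcases List.mem_append.mp hy with h1 | h1
      · exact hqx y h1
      · simp at h1; omega
    have hM : ((Mcnt (q ++ [x]) : Nat) : Int) = max (Mcnt q : Int) ((q.count x : Int) + 1) := by
      rw [Mcnt_append_singleton, Nat.cast_max, max_comm]; push_cast; rfl
    simp only [List.foldl_cons]
    by_cases hxp : x = p
    · subst hxp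
      have hstep : bStep ((Mcnt q : Int), (q.count x : Int), some x) x
          = ((Mcnt (q ++ [x]) : Int), ((q ++ [x]).count x : Int), some x) := by
        have hcx : ((q ++ [x]).count x : Int) = (q.count x : Int) + 1 := by
          simp [List.count_append]
        simp only [bStep]
        rw [hM, hcx]
        simp
      rw [hstep, ih (q ++ [x]) x hpw' hmem' hle', List.append_assoc]
      rfl
    · have hxq : x ∉ q := by
        intro hmem
        exact hxp (le_antisymm (hle x hmem) (hqx p hp))
      have hc0 : q.count x = 0 := List.count_eq_zero.mpr hxq
      have hstep : bStep ((Mcnt q : Int), (q.count p : Int), some p) x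
          = ((Mcnt (q ++ [x]) : Int), ((q ++ [x]).count x : Int), some x) := by
        have hne : ¬ (some p = some x) := by simpa using fun h => hxp h.symm
        simp only [bStep, if_neg hne]
        rw [hM, hc0]
        have : ((q ++ [x]).count x : Int) = 1 := by
          simp [List.count_append, hc0]
        rw [this]
        norm_num
      rw [hstep, ih (q ++ [x]) x hpw' hmem' hle', List.append_assoc]
      rfl

-- B's result is the max multiplicity of the length list.
theorem solB (L : List Int) (h : L ≠ []) :
    ((PySem.List.sorted L (fun x => x) false).foldl bStep (0, 0, none)).1 = (Mcnt L : Int) := by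
  have hperm : (PySem.List.sorted L (fun x => x) false).Perm L := PySem.List.sorted_perm L _ _
  have hMp : Mcnt (PySem.List.sorted L (fun x => x) false) = Mcnt L := by
    unfold Mcnt
    rw [List.toFinset_eq_of_perm _ _ hperm]
    exact Finset.sup_congr rfl (fun y _ => hperm.count_eq y)
  have hne : PySem.List.sorted L (fun x => x) false ≠ [] := by
    intro he; exact h ((PySem.List.sorted_eq_nil_iff _ _ _).mp he)
  have hpw : (PySem.List.sorted L (fun x => x) false).Pairwise (· ≤ ·) := by
    have := PySem.List.sorted_pairwise (xs := L) (key := fun x => x)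
    simpa using this
  obtain ⟨x, t, hxt⟩ := List.exists_cons_of_ne_nil hne
  rw [← hMp, hxt]
  simp only [List.foldl_cons]
  have hstep : bStep (0, 0, none) x = ((Mcnt [x] : Int), (([x] : List Int).count x : Int), some x) := by
    simp only [bStep]
    norm_num [Mcnt]
  rw [hstep]
  have := runInv t [x] x (by rw [hxt] at hpw; simpa using hpw) (by simp) (by simp)
  simpa using this

-- ===== VERDICT =====
theorem solution_spec : Claim_equal_solution := by
  intro strArr _ hpre
  unfold Spec_solution solution solution_alt
  have hL : strArr.map (fun s => (PySem.Str.len s : Int)) ≠ [] := by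
    simpa using hpre
  rw [solution_dict_eq]
  simp only [PySem.Dict.values, PySem.Dict.items_counter, List.map_map]
  rw [Function.comp_def]
  rw [solA _ hL, solB _ hL]
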